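-- pv_equiv track=rewrite | github.com/thiagolopomo/vivo-fiscal-suite | validar_logic.py | descobrir_idx_dsc
-- ===== SOURCE A (Python) =====
-- def descobrir_idx_dsc(header_cols):
--     prioridades = [
--         "DSC",
--         "INFSM_DSC",
--         "DSC_1",
--         "DESCRICAO",
--         "DESCRIÇÃO",
--     ]
--
--     upper_cols = [c.upper() for c in header_cols]
--
--     for alvo in prioridades:
--         if alvo in upper_cols:
--             return upper_cols.index(alvo)
--
--     for i, c in enumerate(upper_cols):
--         if "DSC" in c:
--             return i
--
--     return None
-- ===== SOURCE B (Python) =====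
-- def descobrir_idx_dsc(header_cols):
--     rank = {"DSC": 0, "INFSM_DSC": 1, "DSC_1": 2, "DESCRICAO": 3, "DESCRIÇÃO": 4}
--     best_rank = None
--     best_idx = None
--     dsc_idx = None
--     for i, c in enumerate(header_cols):
--         u = c.upper()
--         r = rank.get(u)
--         if r is not None and (best_rank is None or r < best_rank):
--             best_rank, best_idx = r, i
--         if dsc_idx is None and "DSC" in u:
--             dsc_idx = i
--     return best_idx if best_idx is not None else dsc_idx
-- ===== Notes on version B (the rewrite author's own statement) =====
-- stated objective: alternative
-- what changed: Replaces the two full scans (one membership+index scan per priority, then a substring scan) with a single pass over header_cols maintaining a running minimum priority rank (strict-< update keeps the earliest index) and the first 'DSC'-substring index.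
import Mathlib
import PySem

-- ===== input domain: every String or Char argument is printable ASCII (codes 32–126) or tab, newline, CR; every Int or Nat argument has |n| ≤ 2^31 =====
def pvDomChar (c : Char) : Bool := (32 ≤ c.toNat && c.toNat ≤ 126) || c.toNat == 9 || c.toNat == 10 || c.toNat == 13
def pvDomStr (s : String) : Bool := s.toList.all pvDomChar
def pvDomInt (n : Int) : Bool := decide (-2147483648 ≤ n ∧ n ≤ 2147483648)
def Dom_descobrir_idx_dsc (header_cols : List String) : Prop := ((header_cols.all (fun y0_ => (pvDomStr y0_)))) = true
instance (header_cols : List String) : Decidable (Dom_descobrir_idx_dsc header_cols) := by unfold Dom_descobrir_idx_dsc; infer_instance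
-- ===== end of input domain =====

-- B replaces A's two full scans (one membership+index scan per priority, then a substring scan)
-- by a single pass maintaining a running minimum priority rank and the first 'DSC'-substring index.

-- ===== PORT A =====
def pvPrioridades : List String := ["DSC", "INFSM_DSC", "DSC_1", "DESCRICAO", "DESCRIÇÃO"]

-- 'for alvo in prioridades: if alvo in upper_cols: return upper_cols.index(alvo)'
def pvLoopPrio : List String → List String → Option Int
  | [], _ => none
  | alvo :: rest, upper_cols =>
    if alvo ∈ upper_cols then (PySem.List.index? upper_cols alvo).map (fun n => (n : Int))
    else pvLoopPrio rest upper_cols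

-- 'for i, c in enumerate(upper_cols): if "DSC" in c: return i'
def pvLoopDsc : List String → Int → Option Int
  | [], _ => none
  | c :: rest, i => if PySem.Str.isIn "DSC" c then some i else pvLoopDsc rest (i + 1)

def descobrir_idx_dsc (header_cols : List String) : Option Int :=
  let upper_cols := header_cols.map PySem.Str.upper
  match pvLoopPrio pvPrioridades upper_cols with
  | some r => some r
  | none => pvLoopDsc upper_cols 0

-- ===== PORT B =====
def pvRank : PySem.Dict String Int :=
  PySem.Dict.ofList [("DSC", 0), ("INFSM_DSC", 1), ("DSC_1", 2), ("DESCRICAO", 3), ("DESCRIÇÃO", 4)]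

-- single pass: best = (best_rank, best_idx) (strict-< update), dsc = first index with 'DSC' inside
def pvGoB : List String → Int → Option (Int × Int) → Option Int → Option Int
  | [], _, best, dsc =>
    (match best with
     | some (_, bi) => some bi
     | none => dsc)
  | c :: rest, i, best, dsc =>
    let u := PySem.Str.upper c
    let best' :=
      match PySem.Dict.get? pvRank u, best with
      | some rv, some (br, bi) => if rv < br then some (rv, i) else some (br, bi)
      | some rv, none => some (rv, i)
      | none, b => b
    let dsc' := if dsc.isNone && PySem.Str.isIn "DSC" u then some i else dsc
    pvGoB rest (i + 1) best' dsc'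

def descobrir_idx_dsc_alt (header_cols : List String) : Option Int :=
  pvGoB header_cols 0 none none

-- ===== PRECONDITION & SPEC =====
def Spec_descobrir_idx_dsc (header_cols : List String) (out : Option Int) : Prop := out = descobrir_idx_dsc_alt header_cols
instance (header_cols : List String) (out : Option Int) : Decidable (Spec_descobrir_idx_dsc header_cols out) := by unfold Spec_descobrir_idx_dsc; infer_instance

-- ===== CLAIM (what is proved, stated in full; the proofs are below) =====
def Claim_equal_descobrir_idx_dsc : Prop := ∀ (header_cols : List String), Dom_descobrir_idx_dsc header_cols → Spec_descobrir_idx_dsc header_cols (descobrir_idx_dsc header_cols)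

-- ===== LEMMAS AND PROOFS =====

-- 'min by rank, earlier element wins ties' as a binary combine
def pvComb : Option (Int × Int) → Option (Int × Int) → Option (Int × Int)
  | none, b => b
  | some a, none => some a
  | some (ar, ai), some (br, bi) => if br < ar then some (br, bi) else some (ar, ai)

-- reference form of the best-rank state after scanning an (already uppercased) list from index i
def pvBest : List String → Int → Option (Int × Int)
  | [], _ => none
  | u :: t, i => pvComb ((PySem.Dict.get? pvRank u).map (fun r => (r, i))) (pvBest t (i + 1))

lemma pvComb_assoc (x y z : Option (Int × Int)) : pvComb (pvComb x y) z = pvComb x (pvComb y z) := by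
  rcases x with _ | ⟨xr, xi⟩ <;> rcases y with _ | ⟨yr, yi⟩ <;> rcases z with _ | ⟨zr, zi⟩ <;>
    simp only [pvComb] <;> split_ifs <;> simp only [] <;> split_ifs <;>
      first
      | rfl
      | (exfalso; omega)

lemma pvStep (u : String) (i : Int) (best : Option (Int × Int)) :
    (match PySem.Dict.get? pvRank u, best with
      | some rv, some (br, bi) => if rv < br then some (rv, i) else some (br, bi)
      | some rv, none => some (rv, i)
      | none, b => b)
    = pvComb best ((PySem.Dict.get? pvRank u).map (fun r => (r, i))) := by
  rcases h : PySem.Dict.get? pvRank u with _ | rv <;> rcases best with _ | ⟨br, bi⟩ <;> simp [pvComb]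

lemma pvDscOr (c : String) (t : List String) (i : Int) (dsc : Option Int) :
    (if (dsc.isNone && PySem.Str.isIn "DSC" (PySem.Str.upper c)) = true then some i else dsc).or
        (pvLoopDsc (t.map PySem.Str.upper) (i + 1))
      = dsc.or (pvLoopDsc ((c :: t).map PySem.Str.upper) i) := by
  have hstep : pvLoopDsc ((c :: t).map PySem.Str.upper) i
      = if PySem.Str.isIn "DSC" (PySem.Str.upper c) = true then some i
        else pvLoopDsc (t.map PySem.Str.upper) (i + 1) := rfl
  rw [hstep]
  rcases dsc with _ | d
  · cases hP : PySem.Str.isIn "DSC" (PySem.Str.upper c) <;> simp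
  · simp

lemma pvGoB_eq (l : List String) : ∀ (i : Int) (best : Option (Int × Int)) (dsc : Option Int),
    pvGoB l i best dsc =
      (match pvComb best (pvBest (l.map PySem.Str.upper) i) with
       | some (_, bi) => some bi
       | none => dsc.or (pvLoopDsc (l.map PySem.Str.upper) i)) := by
  induction l with
  | nil =>
    intro i best dsc
    rcases best with _ | ⟨br, bi⟩ <;> simp [pvGoB, pvBest, pvComb, pvLoopDsc]
  | cons c t ih =>
    intro i best dsc
    show pvGoB t (i + 1) _ _ = _
    rw [ih]
    have hb : (match PySem.Dict.get? pvRank (PySem.Str.upper c), best with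
      | some rv, some (br, bi) => if rv < br then some (rv, i) else some (br, bi)
      | some rv, none => some (rv, i)
      | none, b => b) = pvComb best ((PySem.Dict.get? pvRank (PySem.Str.upper c)).map (fun r => (r, i))) :=
      pvStep (PySem.Str.upper c) i best
    rw [hb]
    rw [show pvBest ((c :: t).map PySem.Str.upper) i
        = pvComb ((PySem.Dict.get? pvRank (PySem.Str.upper c)).map (fun r => (r, i)))
            (pvBest (t.map PySem.Str.upper) (i + 1)) from rfl]
    rw [← pvComb_assoc]
    -- remaining: the dsc threading
    cases hcb : pvComb (pvComb best ((PySem.Dict.get? pvRank (PySem.Str.upper c)).map (fun r => (r, i))))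
        (pvBest (t.map PySem.Str.upper) (i + 1)) with
    | some p => rcases p with ⟨_, bi⟩; simp
    | none => exact pvDscOr c t i dsc

lemma pvRank_cases (c : String) (r : Int) (h : PySem.Dict.get? pvRank c = some r) :
    (c = "DSC" ∧ r = 0) ∨ (c = "INFSM_DSC" ∧ r = 1) ∨ (c = "DSC_1" ∧ r = 2) ∨
    (c = "DESCRICAO" ∧ r = 3) ∨ (c = "DESCRIÇÃO" ∧ r = 4) := by
  have e : pvRank = PySem.Dict.mk [("DSC", 0), ("INFSM_DSC", 1), ("DSC_1", 2), ("DESCRICAO", 3), ("DESCRIÇÃO", 4)] := by decide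
  rw [e] at h
  simp only [PySem.Dict.get?_mk_cons] at h
  split_ifs at h with h1 h2 h3 h4 h5 <;> simp_all [PySem.Dict.get?]

lemma pvBest_none (us : List String) (i : Int) (h : ∀ c ∈ us, PySem.Dict.get? pvRank c = none) :
    pvBest us i = none := by
  induction us generalizing i with
  | nil => rfl
  | cons u t ih =>
    have hu := h u (by simp)
    have ht : pvBest t (i + 1) = none := ih (i + 1) (fun c hc => h c (by simp [hc]))
    simp [pvBest, hu, pvComb, ht]

lemma pvBest_some_mem (us : List String) : ∀ (i : Int) (r j : Int), pvBest us i = some (r, j) →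
    ∃ c ∈ us, PySem.Dict.get? pvRank c = some r := by
  induction us with
  | nil => intro i r j h; simp [pvBest] at h
  | cons u t ih =>
    intro i r j h
    rcases hu : PySem.Dict.get? pvRank u with _ | rv <;>
      rcases ht : pvBest t (i + 1) with _ | ⟨⟨tr, tj⟩⟩ <;>
        simp [pvBest, hu, ht, pvComb, Option.some.injEq, Prod.mk.injEq] at h
    · obtain ⟨c, hc, hcr⟩ := ih (i + 1) tr tj ht
      exact ⟨c, by simp [hc], by rw [← h.1]; exact hcr⟩
    · exact ⟨u, by simp, by rw [hu, h.1]⟩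
    · split_ifs at h with hlt <;> simp only [Option.some.injEq, Prod.mk.injEq] at h
      · obtain ⟨c, hc, hcr⟩ := ih (i + 1) tr tj ht
        exact ⟨c, by simp [hc], by rw [← h.1]; exact hcr⟩
      · exact ⟨u, by simp, by rw [hu, h.1]⟩

lemma pvBest_min (us : List String) (alvo : String) (r : Int)
    (hrk : PySem.Dict.get? pvRank alvo = some r) :
    ∀ (i : Int) (n : Nat),
      (∀ c ∈ us, ∀ r', PySem.Dict.get? pvRank c = some r' → r ≤ r') →
      PySem.List.index? us alvo = some n →
      pvBest us i = some (r, i + (n : Int)) := by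
  induction us with
  | nil => intro i n _ hidx; rw [PySem.List.index?_eq_idxOf?] at hidx; simp at hidx
  | cons u t ih =>
    intro i n hmin hidx
    by_cases hu : u = alvo
    · subst hu
      rw [PySem.List.index?_cons_self] at hidx
      have hn0 : n = 0 := by injection hidx with h'; omega
      subst hn0
      rcases ht : pvBest t (i + 1) with _ | ⟨⟨tr, tj⟩⟩
      · simp [pvBest, hrk, pvComb, ht]
      · have hle : r ≤ tr := by
          obtain ⟨c, hc, hcr⟩ := pvBest_some_mem t (i + 1) tr tj ht
          exact hmin c (by simp [hc]) tr hcr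
        simp [pvBest, hrk, pvComb, ht, if_neg (not_lt.mpr hle)]
    · rw [PySem.List.index?_cons_of_ne t hu] at hidx
      rcases hm : PySem.List.index? t alvo with _ | m
      · rw [hm] at hidx; simp at hidx
      · rw [hm] at hidx
        have hn : n = m + 1 := by simp at hidx; omega
        subst hn
        have ht := ih (i + 1) m (fun c hc => hmin c (by simp [hc])) hm
        rcases hru : PySem.Dict.get? pvRank u with _ | ru
        · simp [pvBest, hru, pvComb, ht]
          omega
        · have hle : r ≤ ru := hmin u (by simp) ru hru
          have hne : ru ≠ r := by
            intro hrr
            subst hrr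
            rcases pvRank_cases u ru hru with ⟨h1, _⟩ | ⟨h1, _⟩ | ⟨h1, _⟩ | ⟨h1, _⟩ | ⟨h1, _⟩ <;>
              rcases pvRank_cases alvo ru hrk with ⟨h2, _⟩ | ⟨h2, _⟩ | ⟨h2, _⟩ | ⟨h2, _⟩ | ⟨h2, _⟩ <;>
                simp_all
          have hlt : r < ru := lt_of_le_of_ne hle (fun hh => hne hh.symm)
          simp [pvBest, hru, ht, pvComb, hlt]
          omega

lemma pvBranch (us : List String) (alvo : String) (r : Int)
    (hrk : PySem.Dict.get? pvRank alvo = some r) (hmem : alvo ∈ us)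
    (hmin : ∀ c ∈ us, ∀ r', PySem.Dict.get? pvRank c = some r' → r ≤ r') :
    (match pvBest us 0 with
     | some (_, bi) => some bi
     | none => pvLoopDsc us 0)
    = (PySem.List.index? us alvo).map (fun n => (n : Int)) := by
  have hsome : (PySem.List.index? us alvo).isSome := (PySem.List.index?_isSome_iff us alvo).mpr hmem
  rcases hn : PySem.List.index? us alvo with _ | n
  · rw [hn] at hsome; simp at hsome
  · rw [pvBest_min us alvo r hrk 0 n hmin hn]
    simp

lemma pvNotMem_none (us : List String)
    (h0 : "DSC" ∉ us) (h1 : "INFSM_DSC" ∉ us) (h2 : "DSC_1" ∉ us)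
    (h3 : "DESCRICAO" ∉ us) (h4 : "DESCRIÇÃO" ∉ us) :
    ∀ c ∈ us, PySem.Dict.get? pvRank c = none := by
  intro c hc
  rcases hr : PySem.Dict.get? pvRank c with _ | r
  · rfl
  · exfalso
    rcases pvRank_cases c r hr with ⟨h, _⟩ | ⟨h, _⟩ | ⟨h, _⟩ | ⟨h, _⟩ | ⟨h, _⟩ <;> subst h <;>
      [exact h0 hc; exact h1 hc; exact h2 hc; exact h3 hc; exact h4 hc]

-- ===== VERDICT (by name: the statement is the Claim_ definition above) =====
theorem descobrir_idx_dsc_spec : Claim_equal_descobrir_idx_dsc := by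
  intro hc _
  unfold Spec_descobrir_idx_dsc descobrir_idx_dsc descobrir_idx_dsc_alt
  rw [pvGoB_eq]
  simp only [pvComb, Option.none_or]
  set us := hc.map PySem.Str.upper with hus
  by_cases h0 : "DSC" ∈ us
  · rw [show pvLoopPrio pvPrioridades us = (PySem.List.index? us "DSC").map (fun n => (n : Int)) by
      simp [pvLoopPrio, pvPrioridades, h0]]
    rw [← pvBranch us "DSC" 0 (by decide) h0 (by
      intro c hc' r' hr'
      rcases pvRank_cases c r' hr' with ⟨_, h⟩ | ⟨_, h⟩ | ⟨_, h⟩ | ⟨_, h⟩ | ⟨_, h⟩ <;> omega)]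
    cases pvBest us 0 with
    | some p => rcases p with ⟨_, _⟩; rfl
    | none => cases pvLoopDsc us 0 <;> rfl
  · by_cases h1 : "INFSM_DSC" ∈ us
    · rw [show pvLoopPrio pvPrioridades us = (PySem.List.index? us "INFSM_DSC").map (fun n => (n : Int)) by
        simp [pvLoopPrio, pvPrioridades, h0, h1]]
      rw [← pvBranch us "INFSM_DSC" 1 (by decide) h1 (by
        intro c hc' r' hr'
        rcases pvRank_cases c r' hr' with ⟨h, hv⟩ | ⟨_, h⟩ | ⟨_, h⟩ | ⟨_, h⟩ | ⟨_, h⟩ <;>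
          first
          | (exfalso; exact h0 (h ▸ hc'))
          | omega)]
      cases pvBest us 0 with
      | some p => rcases p with ⟨_, _⟩; rfl
      | none => cases pvLoopDsc us 0 <;> rfl
    · by_cases h2 : "DSC_1" ∈ us
      · rw [show pvLoopPrio pvPrioridades us = (PySem.List.index? us "DSC_1").map (fun n => (n : Int)) by
          simp [pvLoopPrio, pvPrioridades, h0, h1, h2]]
        rw [← pvBranch us "DSC_1" 2 (by decide) h2 (by
          intro c hc' r' hr'
          rcases pvRank_cases c r' hr' with ⟨h, hv⟩ | ⟨h, hv⟩ | ⟨_, h⟩ | ⟨_, h⟩ | ⟨_, h⟩ <;>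
            first
            | (exfalso; exact h0 (h ▸ hc'))
            | (exfalso; exact h1 (h ▸ hc'))
            | omega)]
        cases pvBest us 0 with
        | some p => rcases p with ⟨_, _⟩; rfl
        | none => cases pvLoopDsc us 0 <;> rfl
      · by_cases h3 : "DESCRICAO" ∈ us
        · rw [show pvLoopPrio pvPrioridades us = (PySem.List.index? us "DESCRICAO").map (fun n => (n : Int)) by
            simp [pvLoopPrio, pvPrioridades, h0, h1, h2, h3]]
          rw [← pvBranch us "DESCRICAO" 3 (by decide) h3 (by
            intro c hc' r' hr'
            rcases pvRank_cases c r' hr' with ⟨h, hv⟩ | ⟨h, hv⟩ | ⟨h, hv⟩ | ⟨_, h⟩ | ⟨_, h⟩ <;>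
              first
              | (exfalso; exact h0 (h ▸ hc'))
              | (exfalso; exact h1 (h ▸ hc'))
              | (exfalso; exact h2 (h ▸ hc'))
              | omega)]
          cases pvBest us 0 with
          | some p => rcases p with ⟨_, _⟩; rfl
          | none => cases pvLoopDsc us 0 <;> rfl
        · by_cases h4 : "DESCRIÇÃO" ∈ us
          · rw [show pvLoopPrio pvPrioridades us = (PySem.List.index? us "DESCRIÇÃO").map (fun n => (n : Int)) by
              simp [pvLoopPrio, pvPrioridades, h0, h1, h2, h3, h4]]
            rw [← pvBranch us "DESCRIÇÃO" 4 (by decide) h4 (by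
              intro c hc' r' hr'
              rcases pvRank_cases c r' hr' with ⟨h, hv⟩ | ⟨h, hv⟩ | ⟨h, hv⟩ | ⟨h, hv⟩ | ⟨_, h⟩ <;>
                first
                | (exfalso; exact h0 (h ▸ hc'))
                | (exfalso; exact h1 (h ▸ hc'))
                | (exfalso; exact h2 (h ▸ hc'))
                | (exfalso; exact h3 (h ▸ hc'))
                | omega)]
            cases pvBest us 0 with
            | some p => rcases p with ⟨_, _⟩; rfl
            | none => cases pvLoopDsc us 0 <;> rfl
          · rw [show pvLoopPrio pvPrioridades us = none by
              simp [pvLoopPrio, pvPrioridades, h0, h1, h2, h3, h4]]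
            rw [pvBest_none us 0 (pvNotMem_none us h0 h1 h2 h3 h4)]
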